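-- pv_equiv track=rewrite | github.com/yuinaz/discord-bot-railway | satpambot/bot/modules/discord_bot/helpers/img_hashing.py | tile_match_best
-- ===== SOURCE A (Python) =====
-- from typing import List, Iterable, Optional, Set
--
-- def _hamming_hex(a: str, b: str) -> int:
--     try:
--         return (int(a, 16) ^ int(b, 16)).bit_count()
--     except Exception:
--         return 9999
--
-- def tile_match_best(candidate_sigs: List[str], db_sigs: Iterable[str], grid: int, min_tiles: int, per_tile_max_distance: int) -> int:
--     """
--     Return best tile match count between candidate signatures and DB signatures.
--     Two tile strings match on a tile if hamming(p,q) <= per_tile_max_distance.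
--     """
--     if not candidate_sigs or not db_sigs:
--         return 0
--     def split_sig(sig: str) -> List[str]:
--         return [x for x in sig.split("|") if x]
--     best = 0
--     DB = list(db_sigs) if not isinstance(db_sigs, (list, set, tuple)) else db_sigs
--     for cand in candidate_sigs:
--         C = split_sig(cand)
--         for db in DB:
--             D = split_sig(db)
--             if len(C) != len(D):
--                 continue
--             hit = 0
--             for a, b in zip(C, D):
--                 try:
--                     if _hamming_hex(a, b) <= per_tile_max_distance:
--                         hit += 1
--                 except Exception:
--                     pass
--             if hit > best:
--                 best = hit
--             if best >= min_tiles: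
--                 return best
--     return best
-- ===== SOURCE B (Python) =====
-- def _hamming_hex(a: str, b: str) -> int:
--     try:
--         return (int(a, 16) ^ int(b, 16)).bit_count()
--     except Exception:
--         return 9999
--
-- def tile_match_best(candidate_sigs, db_sigs, grid, min_tiles, per_tile_max_distance):
--     if not candidate_sigs or not db_sigs:
--         return 0
--     # group DB splits by tile count once; DB order preserved inside each bucket
--     buckets = {}
--     for db in db_sigs:
--         D = [x for x in db.split("|") if x]
--         buckets[len(D)] = buckets.get(len(D), []) + [D]
--     best = 0
--     for cand in candidate_sigs:
--         C = [x for x in cand.split("|") if x]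
--         for D in buckets.get(len(C), []):
--             hit = sum(1 for a, b in zip(C, D) if _hamming_hex(a, b) <= per_tile_max_distance)
--             if hit > best:
--                 best = hit
--             if best >= min_tiles:
--                 return best
--     return best
-- ===== Notes on version B (the rewrite author's own statement) =====
-- stated objective: alternative
-- what changed: B precomputes each DB signature's split once and groups the splits into a dict keyed by tile count, so each candidate scans only the bucket of its own length and the per-pair len(C)!=len(D) guard disappears; the best-update and early-exit logic is kept so order and return value match exactly.
import Mathlib
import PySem

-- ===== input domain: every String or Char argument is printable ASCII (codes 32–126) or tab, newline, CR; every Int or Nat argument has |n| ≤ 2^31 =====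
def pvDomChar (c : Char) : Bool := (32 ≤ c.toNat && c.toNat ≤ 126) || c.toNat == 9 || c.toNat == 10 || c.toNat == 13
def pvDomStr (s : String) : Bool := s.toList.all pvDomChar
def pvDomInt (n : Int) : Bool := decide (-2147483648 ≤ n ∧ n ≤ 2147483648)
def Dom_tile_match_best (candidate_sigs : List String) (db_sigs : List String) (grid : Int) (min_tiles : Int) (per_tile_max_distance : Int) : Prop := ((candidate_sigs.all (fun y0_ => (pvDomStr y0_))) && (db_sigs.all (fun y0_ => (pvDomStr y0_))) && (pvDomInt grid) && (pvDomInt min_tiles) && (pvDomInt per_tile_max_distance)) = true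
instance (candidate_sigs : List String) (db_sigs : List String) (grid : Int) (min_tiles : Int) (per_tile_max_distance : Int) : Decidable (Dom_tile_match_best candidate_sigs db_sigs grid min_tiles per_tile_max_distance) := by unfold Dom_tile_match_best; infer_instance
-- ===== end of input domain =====

-- B groups the DB splits into a dict keyed by tile count (built once), so the inner scan
-- visits only same-length signatures and the per-pair length guard disappears; objective: alternative.

-- ===== PORT A =====
-- shared helper _hamming_hex (module-level in the Python)
def hammingHex (a b : String) : Int :=
  match PySem.Int.ofStrBase? a 16, PySem.Int.ofStrBase? b 16 with
  | some x, some y => ((PySem.Int.bitCount (PySem.Int.bxor x y)) : Int)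
  | _, _ => 9999

-- split_sig: sig.split("|") keeping non-empty pieces
def splitSig (s : String) : List String :=
  ((PySem.Str.split? s "|").getD []).filter (fun x => x != "")  -- sep "|" ≠ "", so split? is always some (exact)

-- inner 'for a, b in zip(C, D)' hit counter of A
def tmbHit (C D : List String) (ptmd : Int) : Int :=
  (C.zip D).foldl (fun hit p => if hammingHex p.1 p.2 ≤ ptmd then hit + 1 else hit) 0

-- A's inner loop over DB; Bool flags the early 'return best'
def tmbInnerA (C : List String) (min_tiles ptmd : Int) : List String → Int → Int × Bool
  | [], best => (best, false)
  | db :: rest, best =>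
    let D := splitSig db
    if C.length ≠ D.length then tmbInnerA C min_tiles ptmd rest best
    else
      let hit := tmbHit C D ptmd
      let best' := if hit > best then hit else best
      if best' ≥ min_tiles then (best', true)
      else tmbInnerA C min_tiles ptmd rest best'

-- A's outer loop over candidates
def tmbOuterA (DB : List String) (min_tiles ptmd : Int) : List String → Int → Int
  | [], best => best
  | cand :: rest, best =>
    let r := tmbInnerA (splitSig cand) min_tiles ptmd DB best
    if r.2 then r.1 else tmbOuterA DB min_tiles ptmd rest r.1

def tile_match_best (candidate_sigs : List String) (db_sigs : List String) (grid : Int) (min_tiles : Int) (per_tile_max_distance : Int) : Int :=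
  if candidate_sigs.isEmpty || db_sigs.isEmpty then 0
  else tmbOuterA db_sigs min_tiles per_tile_max_distance candidate_sigs 0

-- ===== PORT B =====
-- buckets[len(D)] = buckets.get(len(D), []) + [D]  (d[k] = f(d.get(k, dflt)) is Dict.modify)
def tmbBuckets (db_sigs : List String) : PySem.Dict Int (List (List String)) :=
  db_sigs.foldl (fun d db =>
    let D := splitSig db
    d.modify (D.length : Int) [] (· ++ [D])) PySem.Dict.empty

-- B's inner loop over one bucket (no length guard)
def tmbInnerB (C : List String) (min_tiles ptmd : Int) : List (List String) → Int → Int × Bool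
  | [], best => (best, false)
  | D :: rest, best =>
    let hit := ((C.zip D).countP (fun p => decide (hammingHex p.1 p.2 ≤ ptmd)) : Int)
    let best' := if hit > best then hit else best
    if best' ≥ min_tiles then (best', true)
    else tmbInnerB C min_tiles ptmd rest best'

-- B's outer loop over candidates, visiting only the matching bucket
def tmbOuterB (buckets : PySem.Dict Int (List (List String))) (min_tiles ptmd : Int) : List String → Int → Int
  | [], best => best
  | cand :: rest, best =>
    let C := splitSig cand
    let r := tmbInnerB C min_tiles ptmd (buckets.getD (C.length : Int) []) best
    if r.2 then r.1 else tmbOuterB buckets min_tiles ptmd rest r.1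

def tile_match_best_alt (candidate_sigs : List String) (db_sigs : List String) (grid : Int) (min_tiles : Int) (per_tile_max_distance : Int) : Int :=
  if candidate_sigs.isEmpty || db_sigs.isEmpty then 0
  else tmbOuterB (tmbBuckets db_sigs) min_tiles per_tile_max_distance candidate_sigs 0

-- ===== PRECONDITION & SPEC =====
def Spec_tile_match_best (candidate_sigs : List String) (db_sigs : List String) (grid : Int) (min_tiles : Int) (per_tile_max_distance : Int) (out : Int) : Prop := out = tile_match_best_alt candidate_sigs db_sigs grid min_tiles per_tile_max_distance
instance (candidate_sigs : List String) (db_sigs : List String) (grid : Int) (min_tiles : Int) (per_tile_max_distance : Int) (out : Int) : Decidable (Spec_tile_match_best candidate_sigs db_sigs grid min_tiles per_tile_max_distance out) := by unfold Spec_tile_match_best; infer_instance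

-- ===== CLAIM (what is proved, stated in full; the proofs are below) =====
def Claim_equal_tile_match_best : Prop := ∀ (candidate_sigs : List String) (db_sigs : List String) (grid : Int) (min_tiles : Int) (per_tile_max_distance : Int), Dom_tile_match_best candidate_sigs db_sigs grid min_tiles per_tile_max_distance → Spec_tile_match_best candidate_sigs db_sigs grid min_tiles per_tile_max_distance (tile_match_best candidate_sigs db_sigs grid min_tiles per_tile_max_distance)

-- ===== LEMMAS AND PROOFS =====

-- A's fold-with-if hit counter is a countP
theorem tmbHit_eq (C D : List String) (ptmd : Int) :
    tmbHit C D ptmd = ((C.zip D).countP (fun p => decide (hammingHex p.1 p.2 ≤ ptmd)) : Int) := by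
  unfold tmbHit
  have h : ∀ (l : List (String × String)) (acc : Int),
      l.foldl (fun hit p => if hammingHex p.1 p.2 ≤ ptmd then hit + 1 else hit) acc
        = acc + (l.countP (fun p => decide (hammingHex p.1 p.2 ≤ ptmd)) : Int) := by
    intro l
    induction l with
    | nil => intro acc; simp
    | cons x xs ih =>
      intro acc
      by_cases hx : hammingHex x.1 x.2 ≤ ptmd <;>
        simp [hx, ih] <;> push_cast <;> ring
  simpa using h (C.zip D) 0

-- the bucket for key n is exactly the splits of length n, in DB order
theorem filt_map (DB : List String) (n : Int) :
    ((DB.map (fun db => (((splitSig db).length : Int), splitSig db))).filter (fun p => p.1 == n)).map (fun p => p.2)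
      = (DB.map splitSig).filter (fun D => ((D.length : Int) == n)) := by
  induction DB with
  | nil => simp
  | cons db rest ih =>
    by_cases h : ((splitSig db).length : Int) = n <;> simp [h, ih]

theorem buckets_getD (DB : List String) (n : Int) :
    (tmbBuckets DB).getD n [] = (DB.map splitSig).filter (fun D => ((D.length : Int) == n)) := by
  have hfold : tmbBuckets DB
      = (DB.map (fun db => (((splitSig db).length : Int), splitSig db))).foldl
          (fun d p => d.modify p.1 [] (· ++ [p.2])) PySem.Dict.empty := by
    simp [tmbBuckets, List.foldl_map]
  rw [hfold, PySem.Dict.getD_foldl_modify_append, PySem.Dict.getD_empty, List.nil_append,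
    filt_map]

-- inner loops agree: A over DB skipping length mismatches = B over the filtered splits
theorem inner_eq (C : List String) (mt ptmd : Int) :
    ∀ (DB : List String) (best : Int),
      tmbInnerA C mt ptmd DB best
        = tmbInnerB C mt ptmd ((DB.map splitSig).filter (fun D => ((D.length : Int) == (C.length : Int)))) best := by
  intro DB
  induction DB with
  | nil => intro best; simp [tmbInnerA, tmbInnerB]
  | cons db rest ih =>
    intro best
    rw [List.map_cons, List.filter_cons]
    by_cases h : C.length = (splitSig db).length
    · have hb : (((splitSig db).length : Int) == (C.length : Int)) = true := by simp [h]
      rw [hb]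
      simp only [if_true]
      simp only [tmbInnerA, tmbInnerB, tmbHit_eq, if_neg (not_not_intro h)]
      split_ifs <;> first | rfl | exact ih _
    · have hb : (((splitSig db).length : Int) == (C.length : Int)) = false := by
        simp; omega
      rw [hb]
      simp only [Bool.false_eq_true, if_false]
      simp only [tmbInnerA, if_pos h]
      exact ih best

-- outer loops agree
theorem outer_eq (DB : List String) (mt ptmd : Int) :
    ∀ (cands : List String) (best : Int),
      tmbOuterA DB mt ptmd cands best = tmbOuterB (tmbBuckets DB) mt ptmd cands best := by
  intro cands
  induction cands with
  | nil => intro best; rfl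
  | cons cand rest ih =>
    intro best
    simp only [tmbOuterA, tmbOuterB, buckets_getD, inner_eq]
    split
    · rfl
    · exact ih _

-- ===== VERDICT (by name: the statement is the Claim_ definition above) =====
theorem tile_match_best_spec : Claim_equal_tile_match_best := by
  intro cs ds grid mt ptmd _
  unfold Spec_tile_match_best tile_match_best tile_match_best_alt
  split
  · rfl
  · exact outer_eq ds mt ptmd cs 0
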